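-- pv_equiv track=rewrite | github.com/pirayan20/2110101_Com_Prog | Grader/09/09_NestedList_★★★_Fill_In_Numbers.py | pattern2
-- ===== SOURCE A (Python) =====
-- def pattern2(nrows, ncols):
--     l = []
--     for i in range(nrows):
--         k = i+1-nrows
--         c = []
--         for j in range(ncols):
--             k += nrows
--             c.append(k)
--         l.append(c)
--     return l
-- ===== SOURCE B (Python) =====
-- def pattern2(nrows, ncols):
--     # Build the consecutive-number columns, then transpose them into rows with zip.
--     if nrows <= 0:
--         return []          # no rows: empty matrix
--     cols = [range(j * nrows + 1, (j + 1) * nrows + 1) for j in range(ncols)]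
--     return [list(r) for r in zip(*cols)] if cols else [[] for _ in range(nrows)]
-- ===== Notes on version B (the rewrite author's own statement) =====
-- stated objective: alternative
-- what changed: Instead of A's accumulator-threaded row-by-row double loop (running k incremented by nrows), B builds each column as the consecutive range j*nrows+1..(j+1)*nrows and transposes the list of columns into rows with zip.
import Mathlib
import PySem

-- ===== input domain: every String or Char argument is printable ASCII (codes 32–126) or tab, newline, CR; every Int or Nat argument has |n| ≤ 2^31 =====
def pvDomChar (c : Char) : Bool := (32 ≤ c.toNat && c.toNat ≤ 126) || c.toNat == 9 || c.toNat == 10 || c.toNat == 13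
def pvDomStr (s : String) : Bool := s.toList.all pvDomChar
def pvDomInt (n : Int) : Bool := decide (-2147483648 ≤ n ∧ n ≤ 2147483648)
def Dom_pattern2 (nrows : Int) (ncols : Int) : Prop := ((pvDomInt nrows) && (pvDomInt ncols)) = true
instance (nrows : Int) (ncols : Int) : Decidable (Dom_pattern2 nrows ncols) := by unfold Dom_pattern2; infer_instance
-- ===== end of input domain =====

-- B builds the consecutive-number columns and transposes them into rows, instead of A's
-- accumulator-threaded row-by-row loop (alternative algorithm, same cost).


-- ===== PORT A =====
-- literal transliteration: outer loop builds l, inner loop threads the running k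
def pattern2 (nrows : Int) (ncols : Int) : List (List Int) :=
  (PySem.List.pyRange 0 nrows 1).foldl
    (fun (l : List (List Int)) (i : Int) =>
      let k : Int := i + 1 - nrows
      let kc := (PySem.List.pyRange 0 ncols 1).foldl
        (fun (p : Int × List Int) (_j : Int) =>
          let k' := p.1 + nrows
          (k', p.2 ++ [k']))
        (k, ([] : List Int))
      l ++ [kc.2])
    []

-- ===== PORT B =====
-- helper for B: zip(*cols) — rows of heads while every column is nonempty (Python zip stops at the shortest)
def pattern2ZipStar (cols : List (List Int)) : List (List Int) :=
  if hcols : cols ≠ [] ∧ ∀ c ∈ cols, c ≠ [] then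
    cols.map (fun c => c.head!) :: pattern2ZipStar (cols.map (fun c => c.tail))
  else []
termination_by cols.head!.length
decreasing_by
  match cols, hcols with
  | c :: cs, ⟨_, hall⟩ =>
    simp only [List.head!]
    have hc : c ≠ [] := hall c (by simp)
    have : 0 < c.length := List.length_pos_iff.mpr hc
    simp [List.length_tail]
    omega

-- literal transliteration of Source B: guard the no-rows case, build the columns, transpose with zip
-- (list(r) on a zipped tuple is the identity under the list convention)
def pattern2_alt (nrows : Int) (ncols : Int) : List (List Int) :=
  if nrows ≤ 0 then []
  else
    let cols := (PySem.List.pyRange 0 ncols 1).map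
      (fun j => PySem.List.pyRange (j * nrows + 1) ((j + 1) * nrows + 1) 1)
    if cols ≠ [] then pattern2ZipStar cols
    else (PySem.List.pyRange 0 nrows 1).map (fun _ => [])

-- ===== PRECONDITION & SPEC =====
def Spec_pattern2 (nrows : Int) (ncols : Int) (out : List (List Int)) : Prop := out = pattern2_alt nrows ncols
instance (nrows : Int) (ncols : Int) (out : List (List Int)) : Decidable (Spec_pattern2 nrows ncols out) := by unfold Spec_pattern2; infer_instance

-- ===== CLAIM (what is proved, stated in full; the proofs are below) =====
def Claim_equal_pattern2 : Prop := ∀ (nrows : Int) (ncols : Int), Dom_pattern2 nrows ncols → Spec_pattern2 nrows ncols (pattern2 nrows ncols)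

-- ===== LEMMAS AND PROOFS =====

-- the common canonical form: entry (i, j) = i + 1 + j * nrows
def canon (nrows ncols : Int) : List (List Int) :=
  (PySem.List.pyRange 0 nrows 1).map
    (fun i => (PySem.List.pyRange 0 ncols 1).map (fun j => i + 1 + j * nrows))

-- A's inner loop appends k+nrows, k+2*nrows, ... to c (the traversed elements are ignored)
theorem pattern2_inner (nrows : Int) (js : List Int) (k : Int) (c : List Int) :
    js.foldl (fun (p : Int × List Int) (_j : Int) =>
        let k' := p.1 + nrows
        (k', p.2 ++ [k'])) (k, c)
      = (k + js.length * nrows,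
         c ++ (List.range js.length).map (fun (j : Nat) => k + ((j : Int) + 1) * nrows)) := by
  induction js generalizing k c with
  | nil => simp
  | cons x xs ih =>
    rw [List.foldl_cons]
    show (xs.foldl _ (k + nrows, c ++ [k + nrows])) = _
    rw [ih]
    refine Prod.ext ?_ ?_
    · show k + nrows + (xs.length : Int) * nrows = k + ((xs.length + 1 : Nat) : Int) * nrows
      push_cast; ring
    · show c ++ [k + nrows] ++ (List.range xs.length).map (fun (j : Nat) => (k + nrows) + ((j : Int) + 1) * nrows)
          = c ++ (List.range (xs.length + 1)).map (fun (j : Nat) => k + ((j : Int) + 1) * nrows)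
      rw [List.range_succ_eq_map, List.map_cons, List.map_map, List.append_assoc]
      congr 1
      rw [List.singleton_append]
      congr 1
      · ring
      · refine List.map_congr_left (fun j _ => ?_)
        show (k + nrows) + ((j : Int) + 1) * nrows = k + (((j.succ : Nat) : Int) + 1) * nrows
        push_cast; ring

-- A computes the canonical matrix
theorem pattern2_eq_canon (nrows ncols : Int) : pattern2 nrows ncols = canon nrows ncols := by
  unfold pattern2 canon
  rw [PySem.List.foldl_append_singleton_eq_map]
  simp only [List.nil_append]
  refine List.map_congr_left (fun i _ => ?_)
  rw [PySem.List.pyRange_one 0 ncols, pattern2_inner]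
  simp only [List.length_map, List.length_range, List.map_map, List.nil_append]
  refine List.map_congr_left (fun j _ => ?_)
  simp only [Function.comp_apply]
  ring

-- zip(*cols) of equal-length columns is the index-by-index transpose
theorem zipStar_eq (n : Nat) : ∀ (cols : List (List Int)), cols ≠ [] →
    (∀ c ∈ cols, c.length = n) →
    pattern2ZipStar cols = (List.range n).map (fun i => cols.map (fun c => c.getD i 0)) := by
  induction n with
  | zero =>
    intro cols hne hlen
    match cols with
    | c :: cs =>
      have hc : c = [] := List.eq_nil_of_length_eq_zero (hlen c (by simp))
      rw [pattern2ZipStar]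
      rw [dif_neg (by simp [hc])]
      simp
  | succ m ih =>
    intro cols hne hlen
    have hall : ∀ c ∈ cols, c ≠ [] := by
      intro c hc
      have := hlen c hc
      intro h; rw [h] at this; simp at this
    rw [pattern2ZipStar, dif_pos ⟨hne, hall⟩]
    have hne' : cols.map (fun c => c.tail) ≠ [] := by
      simp only [ne_eq, List.map_eq_nil_iff]; exact hne
    have hlen' : ∀ c ∈ cols.map (fun c => c.tail), c.length = m := by
      intro c hc
      rw [List.mem_map] at hc
      obtain ⟨d, hd, rfl⟩ := hc
      have := hlen d hd
      simp [List.length_tail, this]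
    rw [ih _ hne' hlen']
    rw [List.range_succ_eq_map, List.map_cons, List.map_map]
    congr 1
    · refine List.map_congr_left (fun c hc => ?_)
      match c, hall c hc with
      | x :: xs, _ => rfl
    · refine List.map_congr_left (fun i _ => ?_)
      simp only [Function.comp_apply, List.map_map]
      refine List.map_congr_left (fun c hc => ?_)
      match c, hall c hc with
      | x :: xs, _ => rfl

-- B computes the canonical matrix
theorem alt_eq_canon (nrows ncols : Int) : pattern2_alt nrows ncols = canon nrows ncols := by
  unfold pattern2_alt canon
  by_cases hr : nrows ≤ 0
  · rw [if_pos hr, PySem.List.pyRange_one_eq_nil hr, List.map_nil]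
  · rw [if_neg hr]
    by_cases hc : ncols ≤ 0
    · have hcols : PySem.List.pyRange 0 ncols 1 = [] := PySem.List.pyRange_one_eq_nil hc
      simp [hcols]
    · have hcols : (PySem.List.pyRange 0 ncols 1).map
          (fun j => PySem.List.pyRange (j * nrows + 1) ((j + 1) * nrows + 1) 1) ≠ [] := by
        simp only [ne_eq, List.map_eq_nil_iff]
        rw [PySem.List.pyRange_one_cons (by omega)]
        simp
      rw [if_pos hcols]
      -- every column has length nrows.toNat
      have hlen : ∀ c ∈ (PySem.List.pyRange 0 ncols 1).map
          (fun j => PySem.List.pyRange (j * nrows + 1) ((j + 1) * nrows + 1) 1),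
          c.length = nrows.toNat := by
        intro c hcmem
        rw [List.mem_map] at hcmem
        obtain ⟨j, _, rfl⟩ := hcmem
        rw [PySem.List.length_pyRange_one]
        congr 1
        ring
      rw [zipStar_eq nrows.toNat _ hcols hlen]
      rw [PySem.List.pyRange_one 0 nrows]
      simp only [Int.sub_zero, List.map_map]
      refine List.map_congr_left (fun i hi => ?_)
      simp only [Function.comp_apply, zero_add]
      refine List.map_congr_left (fun j _ => ?_)
      simp only [Function.comp_apply]
      -- entry: the i-th element of column j
      rw [List.mem_range] at hi
      rw [PySem.List.pyRange_one (j * nrows + 1) ((j + 1) * nrows + 1)]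
      have hb : ((j + 1) * nrows + 1 - (j * nrows + 1)) = nrows := by ring
      rw [hb]
      rw [List.getD_eq_getElem _ _ (by simpa using hi)]
      simp only [List.getElem_map, List.getElem_range]
      ring

-- ===== VERDICT (by name: the statement is the Claim_ definition above) =====
theorem pattern2_spec : Claim_equal_pattern2 := by
  intro nrows ncols _
  unfold Spec_pattern2
  rw [pattern2_eq_canon, alt_eq_canon]
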